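-- pv_equiv track=rewrite | github.com/ferazambuja/BBB26 | tests/test_integration_analysis.py | _build_day_reactions
-- ===== SOURCE A (Python) =====
-- NAMES = ["Alice", "Bob", "Carol", "Dave", "Eve"]
--
-- def _build_day_reactions(day_index):
--     """Return per-participant received reactions for a given day index (0-9).
--
--     Pattern:
--     - Days 0-4: Alice/Bob/Carol form a positive cluster; Dave/Eve are negative toward them.
--     - Days 5-9: Dave starts sending hearts to Carol (thaw); Eve stays hostile.
--     - Alice always sends Cobra to Dave, creating a stable rivalry.
--     """
--     # Build an outgoing reaction map: giver -> receiver -> reaction label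
--     outgoing = {}
--     for g in NAMES:
--         outgoing[g] = {}
--         for r in NAMES:
--             if g == r:
--                 continue
--             outgoing[g][r] = "Coração"  # default heart
--
--     # Core alliance: Alice <-> Bob <-> Carol (hearts)
--     # Already set by default.
--
--     # Dave -> Alice: Cobra always
--     outgoing["Dave"]["Alice"] = "Cobra"
--     # Dave -> Bob: Planta (mild negative)
--     outgoing["Dave"]["Bob"] = "Planta"
--     # Alice -> Dave: Cobra always
--     outgoing["Alice"]["Dave"] = "Cobra"
--     # Bob -> Dave: Alvo (strong negative)
--     outgoing["Bob"]["Dave"] = "Alvo"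
--
--     # Eve -> everyone except Dave: varies
--     outgoing["Eve"]["Alice"] = "Cobra"
--     outgoing["Eve"]["Bob"] = "Planta"
--     outgoing["Eve"]["Carol"] = "Mala"
--
--     # Dave -> Carol: evolves over time
--     if day_index < 5:
--         outgoing["Dave"]["Carol"] = "Planta"
--     else:
--         outgoing["Dave"]["Carol"] = "Coração"  # thaw
--
--     # Dave -> Eve: hearts (allies)
--     outgoing["Dave"]["Eve"] = "Coração"
--     # Eve -> Dave: hearts (allies)
--     outgoing["Eve"]["Dave"] = "Coração"
--
--     # Carol -> Dave: mild negative early, then evolves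
--     if day_index < 7:
--         outgoing["Carol"]["Dave"] = "Biscoito"
--     else:
--         outgoing["Carol"]["Dave"] = "Coração"
--
--     # Carol -> Eve: always mild negative
--     outgoing["Carol"]["Eve"] = "Mala"
--
--     # Alice -> Eve: Cobra
--     outgoing["Alice"]["Eve"] = "Cobra"
--     # Bob -> Eve: Planta
--     outgoing["Bob"]["Eve"] = "Planta"
--
--     # Now convert outgoing -> per-receiver received reactions
--     received = {n: {} for n in NAMES}
--     for giver in NAMES:
--         for receiver, label in outgoing[giver].items():
--             received[receiver].setdefault(label, [])
--             received[receiver][label].append(giver)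
--
--     return received
-- ===== SOURCE B (Python) =====
-- NAMES = ["Alice", "Bob", "Carol", "Dave", "Eve"]
--
-- def _build_day_reactions(day_index):
--     overrides = {
--         ("Dave", "Alice"): "Cobra",
--         ("Dave", "Bob"): "Planta",
--         ("Alice", "Dave"): "Cobra",
--         ("Bob", "Dave"): "Alvo",
--         ("Eve", "Alice"): "Cobra",
--         ("Eve", "Bob"): "Planta",
--         ("Eve", "Carol"): "Mala",
--         ("Dave", "Carol"): "Planta" if day_index < 5 else "Coração",
--         ("Carol", "Dave"): "Biscoito" if day_index < 7 else "Coração",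
--         ("Carol", "Eve"): "Mala",
--         ("Alice", "Eve"): "Cobra",
--         ("Bob", "Eve"): "Planta",
--     }
--     received = {}
--     for receiver in NAMES:
--         labels = {}
--         for giver in NAMES:
--             if giver == receiver:
--                 continue
--             label = overrides.get((giver, receiver), "Coração")
--             labels.setdefault(label, []).append(giver)
--         received[receiver] = labels
--     return received
-- ===== Notes on version B (the rewrite author's own statement) =====
-- stated objective: simpler
-- what changed: Replaced A's two-stage construction (build a full giver->receiver->label outgoing map by a default fill plus fourteen in-place edits, then invert it into the received map) by a single flat (giver, receiver)->label overrides dict of the non-default edges, building the received map directly with one receiver/giver double loop and no intermediate map.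
import Mathlib
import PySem

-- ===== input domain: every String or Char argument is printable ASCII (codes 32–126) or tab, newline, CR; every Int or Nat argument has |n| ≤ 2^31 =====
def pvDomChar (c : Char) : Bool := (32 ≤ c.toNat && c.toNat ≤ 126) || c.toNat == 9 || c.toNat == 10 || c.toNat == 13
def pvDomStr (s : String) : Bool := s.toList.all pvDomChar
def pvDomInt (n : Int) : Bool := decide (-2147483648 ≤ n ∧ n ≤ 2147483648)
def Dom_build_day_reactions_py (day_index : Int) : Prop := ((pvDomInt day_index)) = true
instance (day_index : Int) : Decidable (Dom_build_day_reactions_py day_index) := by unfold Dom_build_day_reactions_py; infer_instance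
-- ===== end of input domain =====

-- B replaces A's two-stage outgoing-map construction by a flat (giver, receiver) → label
-- overrides dictionary and builds the received map directly (objective: simpler).


-- ===== PORT A =====
def pyNAMES : List String := ["Alice", "Bob", "Carol", "Dave", "Eve"]

-- outgoing[a][b] = v : fetch the inner dict (always present here), insert, put back
def pySetEdge (og : PySem.Dict String (PySem.Dict String String)) (a b v : String) :
    PySem.Dict String (PySem.Dict String String) :=
  og.insert a ((og.getD a PySem.Dict.empty).insert b v)

def build_day_reactions_py (day_index : Int) : List (String × List (String × List String)) :=
  -- outgoing = {}; for g in NAMES: outgoing[g] = {}; for r in NAMES: if g == r: continue; outgoing[g][r] = "Coração"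
  let outgoing : PySem.Dict String (PySem.Dict String String) :=
    pyNAMES.foldl (fun og g =>
      let og := og.insert g PySem.Dict.empty
      pyNAMES.foldl (fun og r =>
        if g == r then og else pySetEdge og g r "Coração") og)
      PySem.Dict.empty
  let outgoing := pySetEdge outgoing "Dave" "Alice" "Cobra"
  let outgoing := pySetEdge outgoing "Dave" "Bob" "Planta"
  let outgoing := pySetEdge outgoing "Alice" "Dave" "Cobra"
  let outgoing := pySetEdge outgoing "Bob" "Dave" "Alvo"
  let outgoing := pySetEdge outgoing "Eve" "Alice" "Cobra"
  let outgoing := pySetEdge outgoing "Eve" "Bob" "Planta"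
  let outgoing := pySetEdge outgoing "Eve" "Carol" "Mala"
  let outgoing :=
    if day_index < 5 then pySetEdge outgoing "Dave" "Carol" "Planta"
    else pySetEdge outgoing "Dave" "Carol" "Coração"
  let outgoing := pySetEdge outgoing "Dave" "Eve" "Coração"
  let outgoing := pySetEdge outgoing "Eve" "Dave" "Coração"
  let outgoing :=
    if day_index < 7 then pySetEdge outgoing "Carol" "Dave" "Biscoito"
    else pySetEdge outgoing "Carol" "Dave" "Coração"
  let outgoing := pySetEdge outgoing "Carol" "Eve" "Mala"
  let outgoing := pySetEdge outgoing "Alice" "Eve" "Cobra"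
  let outgoing := pySetEdge outgoing "Bob" "Eve" "Planta"
  -- received = {n: {} for n in NAMES}
  let received0 : PySem.Dict String (PySem.Dict String (List String)) :=
    PySem.Dict.ofList (pyNAMES.map (fun n => (n, PySem.Dict.empty)))
  -- for giver in NAMES: for receiver, label in outgoing[giver].items():
  --   received[receiver].setdefault(label, []); received[receiver][label].append(giver)
  let received :=
    pyNAMES.foldl (fun rec giver =>
      (outgoing.getD giver PySem.Dict.empty).items.foldl
        (fun (rec : PySem.Dict String (PySem.Dict String (List String))) p =>
          rec.insert p.1 ((rec.getD p.1 PySem.Dict.empty).modify p.2 [] (fun l => l ++ [giver])))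
        rec)
      received0
  received.items.map (fun p => (p.1, p.2.items))

-- ===== PORT B =====

def altOverrides (day_index : Int) : PySem.Dict (String × String) String :=
  PySem.Dict.ofList
    [ (("Dave", "Alice"), "Cobra"), (("Dave", "Bob"), "Planta"),
      (("Alice", "Dave"), "Cobra"), (("Bob", "Dave"), "Alvo"),
      (("Eve", "Alice"), "Cobra"), (("Eve", "Bob"), "Planta"), (("Eve", "Carol"), "Mala"),
      (("Dave", "Carol"), if day_index < 5 then "Planta" else "Coração"),
      (("Carol", "Dave"), if day_index < 7 then "Biscoito" else "Coração"),
      (("Carol", "Eve"), "Mala"), (("Alice", "Eve"), "Cobra"), (("Bob", "Eve"), "Planta") ]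

def build_day_reactions_py_alt (day_index : Int) : List (String × List (String × List String)) :=
  let overrides := altOverrides day_index
  let received : PySem.Dict String (PySem.Dict String (List String)) :=
    pyNAMES.foldl (fun rec receiver =>
      let labels :=
        pyNAMES.foldl (fun (labels : PySem.Dict String (List String)) giver =>
          if giver == receiver then labels
          else labels.modify (overrides.getD (giver, receiver) "Coração") [] (fun l => l ++ [giver]))
          PySem.Dict.empty
      rec.insert receiver labels)
      PySem.Dict.empty
  received.items.map (fun p => (p.1, p.2.items))

-- ===== PRECONDITION & SPEC =====
def Spec_build_day_reactions_py (day_index : Int) (out : List (String × List (String × List String))) : Prop := out = build_day_reactions_py_alt day_index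
instance (day_index : Int) (out : List (String × List (String × List String))) : Decidable (Spec_build_day_reactions_py day_index out) := by unfold Spec_build_day_reactions_py; infer_instance

-- ===== CLAIM (what is proved, stated in full; the proofs are below) =====
def Claim_equal_build_day_reactions_py : Prop := ∀ (day_index : Int), Dom_build_day_reactions_py day_index → Spec_build_day_reactions_py day_index (build_day_reactions_py day_index)

-- ===== LEMMAS AND PROOFS =====

-- ===== VERDICT (by name: the statement is the Claim_ definition above) =====
set_option maxRecDepth 4096 in
theorem build_day_reactions_py_spec : Claim_equal_build_day_reactions_py := by
  intro d _
  unfold Spec_build_day_reactions_py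
  by_cases h5 : d < 5 <;> by_cases h7 : d < 7
  · simp only [build_day_reactions_py, build_day_reactions_py_alt, altOverrides, if_pos h5, if_pos h7]; decide
  · omega
  · simp only [build_day_reactions_py, build_day_reactions_py_alt, altOverrides, if_neg h5, if_pos h7]; decide
  · simp only [build_day_reactions_py, build_day_reactions_py_alt, altOverrides, if_neg h5, if_neg h7]; decide
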